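-- pv_equiv track=rewrite | github.com/cilaaaa/Kline | uiKLine.py | getdp_minus
-- ===== SOURCE A (Python) =====
-- def getdp_minus(data):
--     # n = len(data)
--     # result = []
--     # seq = []
--     # if n > 0:
--     #     m = [0] * n
--     #     for x in range(n - 2, -1, -1):
--     #         for y in range(n - 1, x, -1):
--     #             if data[x] > data[y] and m[x] <= m[y]:
--     #                 m[x] += 1
--     #         max_value = max(m)
--     #         result = []
--     #         seq = []
--     #         for i in range(n):
--     #             if m[i] == max_value:
--     #                 result.append(data[i])
--     #                 seq.append(i)
--     #                 # 获取Seq返回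
--     #                 max_value -= 1
--     #     if len(result) == 0:
--     #         return None,None
--     # return result[-1],seq[-1]
--     result = []
--     seq = []
--     n = len(data)
--     longest = 0
--     biggest = 0
--     for x in range(0,n-1):
--         Max = data[x]
--         temp = [Max]
--         tempseq = [x]
--         for y in range(x + 1,n):
--             if Max > data[y]:
--                 Max = data[y]
--                 temp.append(Max)
--                 tempseq.append(y)
--         if len(temp) > longest:
--             result = temp
--             seq = tempseq
--             longest = len(temp)
--             biggest = Max
--         elif len(temp) == longest:
--             if Max <= biggest:
--                 result = temp
--                 seq = tempseq
--                 longest = len(temp)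
--                 biggest = Max
--     if len(result) == 0:
--         return None,None
--     return result[-1],seq[-1]
-- ===== SOURCE B (Python) =====
-- def getdp_minus(data):
--     # One backward pass maintains the strictly-decreasing running-minima chain of the
--     # current suffix as a stack (amortized O(n)); a forward pass then selects the best
--     # start index with A's tie rule.
--     n = len(data)
--     if n < 2:
--         return None, None
--     # stack: running-minima chain of suffix data[x:], chain head at the end of the list.
--     # bot: bottom of the chain = (min of suffix, index of its first occurrence).
--     # summ[x] = (chain length, min value, min index) for suffix data[x:]
--     stack = []
--     bot = None
--     summ = [None] * n
--     for x in range(n - 1, -1, -1):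
--         v = data[x]
--         while stack and stack[-1][0] >= v:
--             stack.pop()
--         if not stack:
--             bot = (v, x)
--         stack.append((v, x))
--         summ[x] = (len(stack), bot[0], bot[1])
--     best_len, best_min, best_idx = 0, 0, 0
--     for x in range(n - 1):
--         l, m, i = summ[x]
--         if l > best_len or (l == best_len and m <= best_min):
--             best_len, best_min, best_idx = l, m, i
--     return best_min, best_idx
-- ===== Notes on version B (the rewrite author's own statement) =====
-- stated objective: faster
-- what changed: A rescans the whole suffix for every start index (quadratic); B does one backward pass that incrementally maintains the suffix running-minima chain as a stack (amortized O(1) per element) recording per-start (chain length, suffix min, min index), then one forward pass applies A's selection rule.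
import Mathlib
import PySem

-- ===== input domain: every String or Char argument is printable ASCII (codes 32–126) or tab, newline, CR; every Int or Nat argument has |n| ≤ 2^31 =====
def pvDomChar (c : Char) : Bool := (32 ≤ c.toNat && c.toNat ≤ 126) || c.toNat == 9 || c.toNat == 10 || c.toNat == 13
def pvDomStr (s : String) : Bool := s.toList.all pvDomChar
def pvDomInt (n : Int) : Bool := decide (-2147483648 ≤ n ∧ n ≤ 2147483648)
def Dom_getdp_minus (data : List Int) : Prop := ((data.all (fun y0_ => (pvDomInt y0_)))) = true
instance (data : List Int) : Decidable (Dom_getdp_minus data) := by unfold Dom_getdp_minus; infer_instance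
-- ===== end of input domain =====

-- B replaces A's quadratic per-start rescans by one backward pass that maintains the
-- suffix running-minima chain as a stack, plus a linear selection pass (alternative algorithm).

-- ===== PORT A =====
def getdp_minus (data : List Int) : Option Int × Option Int :=
  let n : Int := (data.length : Int)
  let st :=
    (PySem.List.pyRange 0 (n - 1) 1).foldl
      (fun (st : List Int × List Int × Int × Int) x =>
        let M0 : Int := PySem.List.pyGetD data x 0
        let inner :=
          (PySem.List.pyRange (x + 1) n 1).foldl
            (fun (s : Int × List Int × List Int) y =>
              let v := PySem.List.pyGetD data y 0
              if s.1 > v then (v, s.2.1 ++ [v], s.2.2 ++ [y]) else s)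
            (M0, [M0], [x])
        let Max := inner.1
        let temp := inner.2.1
        let tempseq := inner.2.2
        if (temp.length : Int) > st.2.2.1 then (temp, tempseq, (temp.length : Int), Max)
        else if (temp.length : Int) = st.2.2.1 then
          (if Max ≤ st.2.2.2 then (temp, tempseq, (temp.length : Int), Max) else st)
        else st)
      ([], [], 0, 0)
  if st.1.length = 0 then (none, none)
  else (PySem.List.pyGet? st.1 (-1), PySem.List.pyGet? st.2.1 (-1))

-- ===== PORT B =====
def getdp_minus_alt (data : List Int) : Option Int × Option Int :=
  let n : Int := (data.length : Int)
  if n < 2 then (none, none)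
  else
    let bs :=
      (PySem.List.pyRange (n - 1) (-1) (-1)).foldl
        (fun (st : List (Int × Int) × (Int × Int) × List (Int × Int × Int)) x =>
          let v := PySem.List.pyGetD data x 0
          let stack1 := st.1.dropWhile (fun p => decide (v ≤ p.1))
          let bot := if stack1.isEmpty then (v, x) else st.2.1
          ((v, x) :: stack1, bot, ((stack1.length : Int) + 1, bot.1, bot.2) :: st.2.2))
        ([], (0, 0), [])
    let sel :=
      (bs.2.2.take (n - 1).toNat).foldl
        (fun (b : Int × Int × Int) s =>
          if s.1 > b.1 ∨ (s.1 = b.1 ∧ s.2.1 ≤ b.2.1) then s else b)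
        (0, 0, 0)
    (some sel.2.1, some sel.2.2)

-- ===== PRECONDITION & SPEC =====
def Spec_getdp_minus (data : List Int) (out : Option Int × Option Int) : Prop := out = getdp_minus_alt data
instance (data : List Int) (out : Option Int × Option Int) : Decidable (Spec_getdp_minus data out) := by unfold Spec_getdp_minus; infer_instance

-- ===== CLAIM (what is proved, stated in full; the proofs are below) =====
def Claim_equal_getdp_minus : Prop := ∀ (data : List Int), Dom_getdp_minus data → Spec_getdp_minus data (getdp_minus data)

-- ===== LEMMAS AND PROOFS =====

-- (value, index) pairs of a suffix starting at index i
def pvEnum : Int → List Int → List (Int × Int)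
  | _, [] => []
  | i, a :: l => (a, i) :: pvEnum (i + 1) l

-- the strictly-decreasing running-minima chain of a (value,index) list
def pvChain : List (Int × Int) → List (Int × Int)
  | [] => []
  | p :: l => p :: (pvChain l).dropWhile (fun q => decide (p.1 ≤ q.1))

def pvBot (c : List (Int × Int)) : Int × Int := c.getLast?.getD (0, 0)

def pvSumm (c : List (Int × Int)) : Int × Int × Int := ((c.length : Int), (pvBot c).1, (pvBot c).2)

-- chains of all suffixes, in order
def pvChains : List (Int × Int) → List (List (Int × Int))
  | [] => []
  | p :: l => pvChain (p :: l) :: pvChains l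

-- A's outer-loop body, reformulated on the chain of the suffix starting at x
def pvBranchA (st : List Int × List Int × Int × Int) (c : List (Int × Int)) :
    List Int × List Int × Int × Int :=
  let Max := (pvBot c).1
  let temp := c.map (·.1)
  let tempseq := c.map (·.2)
  if (temp.length : Int) > st.2.2.1 then (temp, tempseq, (temp.length : Int), Max)
  else if (temp.length : Int) = st.2.2.1 then
    (if Max ≤ st.2.2.2 then (temp, tempseq, (temp.length : Int), Max) else st)
  else st

def pvBranchB (b s : Int × Int × Int) : Int × Int × Int :=
  if s.1 > b.1 ∨ (s.1 = b.1 ∧ s.2.1 ≤ b.2.1) then s else b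

lemma pv_dropWhile_dropWhile {α : Type} (p q : α → Bool) (h : ∀ x, q x = true → p x = true) :
    ∀ l : List α, (l.dropWhile q).dropWhile p = l.dropWhile p := by
  intro l
  induction l with
  | nil => rfl
  | cons x l ih =>
    by_cases hq : q x = true
    · rw [List.dropWhile_cons_of_pos hq, ih, List.dropWhile_cons_of_pos (h x hq)]
    · rw [List.dropWhile_cons_of_neg hq]

lemma pv_getLast?_dropWhile {α : Type} (p : α → Bool) (l : List α)
    (h : l.dropWhile p ≠ []) : (l.dropWhile p).getLast? = l.getLast? := by
  conv_rhs => rw [← List.takeWhile_append_dropWhile (p := p) (l := l)]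
  exact (List.getLast?_append_of_ne_nil _ h).symm

lemma pvChain_ne_nil (p : Int × Int) (l : List (Int × Int)) : pvChain (p :: l) ≠ [] := by
  simp [pvChain]

lemma pvChain_cons_cons_of_lt (a b : Int) (i j : Int) (l : List (Int × Int)) (h : b < a) :
    pvChain ((a, i) :: (b, j) :: l) = (a, i) :: pvChain ((b, j) :: l) := by
  simp [pvChain, not_le.mpr h]

lemma pvChain_cons_cons_of_le (a b : Int) (i j : Int) (l : List (Int × Int)) (h : a ≤ b) :
    pvChain ((a, i) :: (b, j) :: l) = pvChain ((a, i) :: l) := by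
  show (a, i) :: _ = (a, i) :: _
  rw [pvChain, List.dropWhile_cons]
  simp only [decide_eq_true_eq, h, if_pos]
  rw [pv_dropWhile_dropWhile]
  intro q hq
  simp only [decide_eq_true_eq] at *
  omega

-- A's inner loop, started on value a at index i, computes the chain of the suffix
lemma pv_inner_chain : ∀ (l : List (Int × Int)) (a i : Int) (t0 s0 : List Int),
    l.foldl
      (fun (s : Int × List Int × List Int) (p : Int × Int) =>
        if s.1 > p.1 then (p.1, s.2.1 ++ [p.1], s.2.2 ++ [p.2]) else s)
      (a, t0 ++ [a], s0 ++ [i])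
    = ((pvBot (pvChain ((a, i) :: l))).1,
       t0 ++ (pvChain ((a, i) :: l)).map (·.1),
       s0 ++ (pvChain ((a, i) :: l)).map (·.2)) := by
  intro l
  induction l with
  | nil => intro a i t0 s0; simp [pvChain, pvBot]
  | cons p l ih =>
    intro a i t0 s0
    obtain ⟨b, j⟩ := p
    by_cases hab : a > b
    · rw [List.foldl_cons]
      simp only [if_pos hab]
      rw [show (t0 ++ [a], s0 ++ [i]).1 ++ [b] = (t0 ++ [a]) ++ [b] from rfl]
      rw [ih b j (t0 ++ [a]) (s0 ++ [i])]
      rw [pvChain_cons_cons_of_lt a b i j l hab]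
      have hne : pvChain ((b, j) :: l) ≠ [] := pvChain_ne_nil _ _
      obtain ⟨q, c', hq⟩ : ∃ q c', pvChain ((b, j) :: l) = q :: c' := by
        cases h : pvChain ((b, j) :: l) with
        | nil => exact absurd h hne
        | cons q c' => exact ⟨q, c', rfl⟩
      simp [hq, pvBot, List.append_assoc]
    · rw [List.foldl_cons]
      simp only [if_neg hab]
      rw [ih a i t0 s0, pvChain_cons_cons_of_le a b i j l (by omega)]

-- index-fold over a range = fold over the enumerated suffix (foldl form)
lemma pv_foldl_range_enum {σ : Type} (xs : List Int) (f : σ → Int → Int → σ) :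
    ∀ (l : List Int) (a : Int) (init : σ), 0 ≤ a → xs.drop a.toNat = l →
    (PySem.List.pyRange a (xs.length : Int) 1).foldl
        (fun s y => f s (PySem.List.pyGetD xs y 0) y) init
      = (pvEnum a l).foldl (fun s p => f s p.1 p.2) init := by
  intro l
  induction l with
  | nil =>
    intro a init ha hd
    have hlen : xs.length ≤ a.toNat := List.drop_eq_nil_iff.mp hd
    rw [PySem.List.pyRange_one_eq_nil (by omega)]
    rfl
  | cons v rest ih =>
    intro a init ha hd
    have hlt : a.toNat < xs.length := by
      by_contra hc
      rw [List.drop_eq_nil_iff.mpr (by omega)] at hd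
      simp at hd
    have hlt' : a < (xs.length : Int) := by omega
    have hget : PySem.List.pyGetD xs a 0 = v := by
      rw [PySem.List.pyGetD_eq_getElem xs 0 ha (by omega)]
      have h0 : (xs.drop a.toNat)[0]'(by simp [hd]) = v := by simp [hd]
      rw [List.getElem_drop] at h0
      simpa using h0
    have hd' : xs.drop (a + 1).toNat = rest := by
      have h1 : (a + 1).toNat = a.toNat + 1 := by omega
      rw [h1, ← List.drop_drop, hd, List.drop_one]; rfl
    rw [PySem.List.pyRange_one_cons hlt', List.foldl_cons, hget]
    show (PySem.List.pyRange (a+1) (xs.length : Int) 1).foldl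
        (fun s y => f s (PySem.List.pyGetD xs y 0) y) (f init v a)
      = (pvEnum a (v :: rest)).foldl (fun s p => f s p.1 p.2) init
    rw [ih (a + 1) (f init v a) (by omega) hd']
    rfl

-- index-fold over a range = fold over the enumerated suffix (foldr form)
lemma pv_foldr_range_enum {σ : Type} (xs : List Int) (g : Int → Int → σ → σ) :
    ∀ (l : List Int) (a : Int) (init : σ), 0 ≤ a → xs.drop a.toNat = l →
    (PySem.List.pyRange a (xs.length : Int) 1).foldr
        (fun y s => g (PySem.List.pyGetD xs y 0) y s) init
      = (pvEnum a l).foldr (fun p s => g p.1 p.2 s) init := by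
  intro l
  induction l with
  | nil =>
    intro a init ha hd
    have hlen : xs.length ≤ a.toNat := List.drop_eq_nil_iff.mp hd
    rw [PySem.List.pyRange_one_eq_nil (by omega)]
    rfl
  | cons v rest ih =>
    intro a init ha hd
    have hlt : a.toNat < xs.length := by
      by_contra hc
      rw [List.drop_eq_nil_iff.mpr (by omega)] at hd
      simp at hd
    have hlt' : a < (xs.length : Int) := by omega
    have hget : PySem.List.pyGetD xs a 0 = v := by
      rw [PySem.List.pyGetD_eq_getElem xs 0 ha (by omega)]
      have h0 : (xs.drop a.toNat)[0]'(by simp [hd]) = v := by simp [hd]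
      rw [List.getElem_drop] at h0
      simpa using h0
    have hd' : xs.drop (a + 1).toNat = rest := by
      have h1 : (a + 1).toNat = a.toNat + 1 := by omega
      rw [h1, ← List.drop_drop, hd, List.drop_one]; rfl
    rw [PySem.List.pyRange_one_cons hlt', List.foldr_cons, hget,
      ih (a + 1) init (by omega) hd']
    rfl

-- B's backward pass builds the chain, its bottom, and all suffix summaries
lemma pv_b_fold : ∀ (l : List Int) (a : Int),
    (pvEnum a l).foldr
      (fun (p : Int × Int) (st : List (Int × Int) × (Int × Int) × List (Int × Int × Int)) =>
        let stack1 := st.1.dropWhile (fun q => decide (p.1 ≤ q.1))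
        let bot := if stack1.isEmpty then (p.1, p.2) else st.2.1
        ((p.1, p.2) :: stack1, bot, ((stack1.length : Int) + 1, bot.1, bot.2) :: st.2.2))
      ([], (0, 0), [])
    = (pvChain (pvEnum a l), pvBot (pvChain (pvEnum a l)),
       (pvChains (pvEnum a l)).map pvSumm) := by
  intro l
  induction l with
  | nil => intro a; simp [pvEnum, pvChain, pvBot, pvChains]
  | cons v rest ih =>
    intro a
    rw [show pvEnum a (v :: rest) = (v, a) :: pvEnum (a + 1) rest from rfl,
      List.foldr_cons, ih (a + 1)]
    have hchain : pvChain ((v, a) :: pvEnum (a + 1) rest)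
        = (v, a) :: (pvChain (pvEnum (a + 1) rest)).dropWhile (fun q => decide (v ≤ q.1)) := rfl
    simp only []
    set c' := pvChain (pvEnum (a + 1) rest) with hc'
    set stack1 := c'.dropWhile (fun q => decide (v ≤ q.1)) with hs1
    have hbot : (if stack1.isEmpty then (v, a) else pvBot c')
        = pvBot (pvChain ((v, a) :: pvEnum (a + 1) rest)) := by
      rw [hchain]
      cases hst : stack1 with
      | nil => simp [pvBot]
      | cons q qs =>
        have hne : stack1 ≠ [] := by rw [hst]; simp
        have hc'ne : c' ≠ [] := by
          intro h; rw [hs1, h] at hne; simp at hne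
        have h1 : ((v, a) :: stack1).getLast? = stack1.getLast? := by
          rw [hst]; exact List.getLast?_cons_cons
        have h2 : stack1.getLast? = c'.getLast? := pv_getLast?_dropWhile _ _ hne
        rw [if_neg (by simp)]
        simp only [pvBot]
        rw [← hst, h1, h2]
    refine Prod.ext ?_ (Prod.ext ?_ ?_)
    · exact hchain.symm
    · simpa using hbot
    · show ((stack1.length : Int) + 1, _, _) :: (pvChains (pvEnum (a + 1) rest)).map pvSumm
        = (pvChains ((v, a) :: pvEnum (a + 1) rest)).map pvSumm
      rw [show pvChains ((v, a) :: pvEnum (a + 1) rest)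
          = pvChain ((v, a) :: pvEnum (a + 1) rest) :: pvChains (pvEnum (a + 1) rest) from rfl]
      rw [List.map_cons]
      congr 1
      rw [pvSumm, hchain]
      refine Prod.ext ?_ ?_
      · simp
      · simp only []
        rw [← hchain, ← hbot]

-- A's outer fold = fold of pvBranchA over the chains of all proper suffix starts
lemma pv_a_fold (data : List Int) : ∀ (l : List Int) (a : Int)
    (st : List Int × List Int × Int × Int), 0 ≤ a → data.drop a.toNat = l →
    (PySem.List.pyRange a ((data.length : Int) - 1) 1).foldl
      (fun (st : List Int × List Int × Int × Int) x =>
        let M0 : Int := PySem.List.pyGetD data x 0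
        let inner :=
          (PySem.List.pyRange (x + 1) ((data.length : Int)) 1).foldl
            (fun (s : Int × List Int × List Int) y =>
              let v := PySem.List.pyGetD data y 0
              if s.1 > v then (v, s.2.1 ++ [v], s.2.2 ++ [y]) else s)
            (M0, [M0], [x])
        let Max := inner.1
        let temp := inner.2.1
        let tempseq := inner.2.2
        if (temp.length : Int) > st.2.2.1 then (temp, tempseq, (temp.length : Int), Max)
        else if (temp.length : Int) = st.2.2.1 then
          (if Max ≤ st.2.2.2 then (temp, tempseq, (temp.length : Int), Max) else st)
        else st)
      st
    = ((pvChains (pvEnum a l)).dropLast).foldl pvBranchA st := by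
  intro l
  induction l with
  | nil =>
    intro a st ha hd
    have hlen : data.length ≤ a.toNat := List.drop_eq_nil_iff.mp hd
    rw [PySem.List.pyRange_one_eq_nil (by omega)]
    rfl
  | cons v rest ih =>
    intro a st ha hd
    cases rest with
    | nil =>
      have hlen : data.length = a.toNat + 1 := by
        have := congrArg List.length hd
        simp at this
        omega
      rw [PySem.List.pyRange_one_eq_nil (by omega)]
      rfl
    | cons w rest' =>
      have hlen : a.toNat + 2 ≤ data.length := by
        have := congrArg List.length hd
        simp at this
        omega
      have hlt : a < (data.length : Int) - 1 := by omega
      have hget : PySem.List.pyGetD data a 0 = v := by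
        rw [PySem.List.pyGetD_eq_getElem data 0 ha (by omega)]
        have h0 : (data.drop a.toNat)[0]'(by simp [hd]) = v := by simp [hd]
        rw [List.getElem_drop] at h0
        simpa using h0
      have hd' : data.drop (a + 1).toNat = w :: rest' := by
        have h1 : (a + 1).toNat = a.toNat + 1 := by omega
        rw [h1, ← List.drop_drop, hd, List.drop_one]; rfl
      have hinner :
          (PySem.List.pyRange (a + 1) ((data.length : Int)) 1).foldl
            (fun (s : Int × List Int × List Int) y =>
              let u := PySem.List.pyGetD data y 0
              if s.1 > u then (u, s.2.1 ++ [u], s.2.2 ++ [y]) else s)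
            (v, [v], [a])
          = ((pvBot (pvChain (pvEnum a (v :: w :: rest')))).1,
             (pvChain (pvEnum a (v :: w :: rest'))).map (·.1),
             (pvChain (pvEnum a (v :: w :: rest'))).map (·.2)) := by
        have hc := pv_foldl_range_enum data
          (fun (s : Int × List Int × List Int) (u y : Int) =>
            if s.1 > u then (u, s.2.1 ++ [u], s.2.2 ++ [y]) else s)
          (w :: rest') (a + 1) (v, [v], [a]) (by omega) hd'
        rw [hc]
        have := pv_inner_chain (pvEnum (a + 1) (w :: rest')) v a [] []
        simpa using this
      rw [PySem.List.pyRange_one_cons hlt, List.foldl_cons]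
      rw [show pvEnum a (v :: w :: rest') = (v, a) :: pvEnum (a + 1) (w :: rest') from rfl]
      rw [show pvChains ((v, a) :: pvEnum (a + 1) (w :: rest'))
          = pvChain ((v, a) :: pvEnum (a + 1) (w :: rest'))
            :: pvChains (pvEnum (a + 1) (w :: rest')) from rfl]
      have hne : pvChains (pvEnum (a + 1) (w :: rest')) ≠ [] := by
        simp [pvEnum, pvChains]
      rw [List.dropLast_cons_of_ne_nil hne, List.foldl_cons]
      rw [← ih (a + 1) _ (by omega) hd']
      congr 1
      simp only [hget, hinner]
      rfl

lemma pv_chains_mem_ne_nil : ∀ (l : List (Int × Int)) (c : List (Int × Int)),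
    c ∈ pvChains l → c ≠ [] := by
  intro l
  induction l with
  | nil => simp [pvChains]
  | cons p l ih =>
    intro c hc
    rcases (by simpa [pvChains] using hc) with h | h
    · subst h; exact pvChain_ne_nil _ _
    · exact ih _ h

lemma pv_length_pvChains : ∀ l : List (Int × Int), (pvChains l).length = l.length := by
  intro l; induction l with
  | nil => rfl
  | cons p l ih => simp [pvChains, ih]

lemma pv_length_pvEnum : ∀ (l : List Int) (a : Int), (pvEnum a l).length = l.length := by
  intro l; induction l with
  | nil => intro a; rfl
  | cons x l ih => intro a; simp [pvEnum, ih]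

-- invariant linking A's selection state to B's
def pvRel (stA : List Int × List Int × Int × Int) (stB : Int × Int × Int) : Prop :=
  stA.2.2.1 = stB.1 ∧ stA.2.2.2 = stB.2.1 ∧
  stA.1.getLast? = some stB.2.1 ∧ stA.2.1.getLast? = some stB.2.2 ∧ stA.1 ≠ []

lemma pv_getLast?_bot (c : List (Int × Int)) (hc : c ≠ []) : c.getLast? = some (pvBot c) := by
  cases h : c.getLast? with
  | none => exact absurd (List.getLast?_eq_none_iff.mp h) hc
  | some p => simp [pvBot, h]

lemma pv_take_rel (c : List (Int × Int)) (hc : c ≠ []) :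
    pvRel (c.map (·.1), c.map (·.2), ((c.length : Int)), (pvBot c).1)
      (((c.length : Int)), (pvBot c).1, (pvBot c).2) := by
  refine ⟨rfl, rfl, ?_, ?_, by simp [hc]⟩
  · show (c.map (·.1)).getLast? = _
    rw [List.getLast?_map, pv_getLast?_bot c hc]; rfl
  · show (c.map (·.2)).getLast? = _
    rw [List.getLast?_map, pv_getLast?_bot c hc]; rfl

lemma pv_branch_rel (c : List (Int × Int)) (hc : c ≠ [])
    (stA : List Int × List Int × Int × Int) (stB : Int × Int × Int) (h : pvRel stA stB) :
    pvRel (pvBranchA stA c) (pvBranchB stB (pvSumm c)) := by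
  obtain ⟨h1, h2, h3, h4, h5⟩ := h
  unfold pvBranchA pvBranchB pvSumm
  simp only [List.length_map, h1, h2]
  by_cases g1 : (c.length : Int) > stB.1
  · rw [if_pos g1, if_pos (Or.inl g1)]; exact pv_take_rel c hc
  · rw [if_neg g1]
    by_cases g2 : (c.length : Int) = stB.1
    · rw [if_pos g2]
      by_cases g3 : (pvBot c).1 ≤ stB.2.1
      · rw [if_pos g3, if_pos (Or.inr ⟨g2, g3⟩)]; exact pv_take_rel c hc
      · rw [if_neg g3, if_neg (by rintro (h | ⟨_, h⟩) <;> [exact g1 h; exact g3 h])]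
        exact ⟨h1, h2, h3, h4, h5⟩
    · rw [if_neg g2, if_neg (by rintro (h | ⟨h, _⟩) <;> [exact g1 h; exact g2 h])]
      exact ⟨h1, h2, h3, h4, h5⟩

-- the two selection folds stay in lockstep
lemma pv_sel_rel : ∀ (cs : List (List (Int × Int))), (∀ c ∈ cs, c ≠ []) →
    ∀ (stA : List Int × List Int × Int × Int) (stB : Int × Int × Int), pvRel stA stB →
    pvRel (cs.foldl pvBranchA stA) ((cs.map pvSumm).foldl pvBranchB stB) := by
  intro cs
  induction cs with
  | nil => intro _ stA stB h; exact h
  | cons c cs ih =>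
    intro hne stA stB h
    rw [List.map_cons, List.foldl_cons, List.foldl_cons]
    exact ih (fun c' hc' => hne c' (List.mem_cons_of_mem _ hc')) _ _
      (pv_branch_rel c (hne c List.mem_cons_self) stA stB h)

def pvFinishA (st : List Int × List Int × Int × Int) : Option Int × Option Int :=
  if st.1.length = 0 then (none, none)
  else (PySem.List.pyGet? st.1 (-1), PySem.List.pyGet? st.2.1 (-1))

def pvFinishB (sel : Int × Int × Int) : Option Int × Option Int :=
  (some sel.2.1, some sel.2.2)

-- ===== VERDICT (by name: the statement is the Claim_ definition above) =====
theorem getdp_minus_spec : Claim_equal_getdp_minus := by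
  intro data _
  show getdp_minus data = getdp_minus_alt data
  by_cases hn : (data.length : Int) < 2
  · have hr : PySem.List.pyRange 0 ((data.length : Int) - 1) 1 = [] :=
      PySem.List.pyRange_one_eq_nil (by omega)
    simp only [getdp_minus, getdp_minus_alt, hr, List.foldl_nil, if_pos hn]
    rfl
  · have eA : getdp_minus data
        = pvFinishA (((pvChains (pvEnum 0 data)).dropLast).foldl pvBranchA ([], [], 0, 0)) :=
      congrArg pvFinishA (pv_a_fold data data 0 ([], [], 0, 0) le_rfl (by simp))
    have hrev : PySem.List.pyRange ((data.length : Int) - 1) (-1) (-1)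
        = (PySem.List.pyRange 0 ((data.length : Int)) 1).reverse := by
      rw [PySem.List.pyRange_neg_one_eq_reverse]
      norm_num
    have hfold :
        (PySem.List.pyRange ((data.length : Int) - 1) (-1) (-1)).foldl
          (fun (st : List (Int × Int) × (Int × Int) × List (Int × Int × Int)) x =>
            let v := PySem.List.pyGetD data x 0
            let stack1 := st.1.dropWhile (fun p => decide (v ≤ p.1))
            let bot := if stack1.isEmpty then (v, x) else st.2.1
            ((v, x) :: stack1, bot, ((stack1.length : Int) + 1, bot.1, bot.2) :: st.2.2))
          ([], (0, 0), [])
        = (pvChain (pvEnum 0 data), pvBot (pvChain (pvEnum 0 data)),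
           (pvChains (pvEnum 0 data)).map pvSumm) := by
      rw [hrev, List.foldl_reverse]
      exact (pv_foldr_range_enum data
        (fun (v x : Int) (st : List (Int × Int) × (Int × Int) × List (Int × Int × Int)) =>
          let stack1 := st.1.dropWhile (fun p => decide (v ≤ p.1))
          let bot := if stack1.isEmpty then (v, x) else st.2.1
          ((v, x) :: stack1, bot, ((stack1.length : Int) + 1, bot.1, bot.2) :: st.2.2))
        data 0 ([], (0, 0), []) le_rfl (by simp)).trans (pv_b_fold data 0)
    have eB : getdp_minus_alt data
        = pvFinishB (((((pvChains (pvEnum 0 data)).map pvSumm).take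
            (((data.length : Int) - 1).toNat))).foldl pvBranchB (0, 0, 0)) :=
      (congrArg (fun r : List (Int × Int) × (Int × Int) × List (Int × Int × Int) =>
        if (data.length : Int) < 2 then ((none, none) : Option Int × Option Int)
        else pvFinishB ((r.2.2.take (((data.length : Int) - 1).toNat)).foldl pvBranchB (0, 0, 0)))
        hfold).trans (if_neg hn)
    have hlen_cs : (pvChains (pvEnum 0 data)).length = data.length := by
      rw [pv_length_pvChains, pv_length_pvEnum]
    have htake : (((pvChains (pvEnum 0 data)).map pvSumm).take (((data.length : Int) - 1).toNat))
        = ((pvChains (pvEnum 0 data)).dropLast).map pvSumm := by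
      rw [List.dropLast_eq_take, List.map_take, hlen_cs]
      congr 1
      omega
    have hcne : ∀ c' ∈ (pvChains (pvEnum 0 data)).dropLast, c' ≠ [] := fun c' hc' =>
      pv_chains_mem_ne_nil _ c' ((List.dropLast_sublist _).subset hc')
    have hdl : (pvChains (pvEnum 0 data)).dropLast ≠ [] := by
      have hl : (pvChains (pvEnum 0 data)).dropLast.length = data.length - 1 := by
        rw [List.length_dropLast, hlen_cs]
      intro h
      rw [h] at hl
      simp at hl
      omega
    obtain ⟨c, cs'', hcons⟩ : ∃ c cs'', (pvChains (pvEnum 0 data)).dropLast = c :: cs'' := by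
      cases h : (pvChains (pvEnum 0 data)).dropLast with
      | nil => exact absurd h hdl
      | cons c cs'' => exact ⟨c, cs'', rfl⟩
    have hc : c ≠ [] := hcne c (by rw [hcons]; exact List.mem_cons_self)
    have hcpos : (0 : Int) < (c.length : Int) := by
      exact_mod_cast List.length_pos_of_ne_nil hc
    have hstep1A : pvBranchA ([], [], 0, 0) c
        = (c.map (·.1), c.map (·.2), ((c.length : Int)), (pvBot c).1) := by
      unfold pvBranchA
      simp only [List.length_map]
      rw [if_pos hcpos]
    have hstep1B : pvBranchB (0, 0, 0) (pvSumm c)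
        = (((c.length : Int)), (pvBot c).1, (pvBot c).2) := by
      unfold pvBranchB pvSumm
      rw [if_pos (Or.inl hcpos)]
    have hrel := pv_sel_rel cs''
      (fun c' h' => hcne c' (by rw [hcons]; exact List.mem_cons_of_mem _ h'))
      (pvBranchA ([], [], 0, 0) c) (pvBranchB (0, 0, 0) (pvSumm c))
      (by rw [hstep1A, hstep1B]; exact pv_take_rel c hc)
    obtain ⟨r1, r2, r3, r4, r5⟩ := hrel
    rw [eA, eB, htake, hcons, List.map_cons, List.foldl_cons, List.foldl_cons]
    unfold pvFinishA pvFinishB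
    rw [if_neg (by simpa using r5)]
    rw [PySem.List.pyGet?_neg_one, PySem.List.pyGet?_neg_one, r3, r4]
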